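-- pv_equiv track=rewrite | github.com/fatemefaraji/chatbot | chatbot.py | format_database_response
-- ===== SOURCE A (Python) =====
-- from typing import Dict, List, Optional, Tuple
--
-- def format_database_response(category: str, results: List[Dict]) -> str:
--     if not results:
--         return f"I couldn't find any {category} matching your criteria."
--
--     response = f"I found {len(results)} matching {category}(s):\n"
--     for i, result in enumerate(results, 1):
--         response += f"\n{i}. "
--         if 'name' in result:
--             response += f"{result['name']}"
--         if 'type' in result:
--             response += f" ({result['type']})"
--         if 'area' in result:
--             response += f" in {result['area']}"
--         if 'pricerange' in result:
--             response += f" - {result['pricerange']} price range"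
--         if 'phone' in result:
--             response += f"\n   phone: {result['phone']}"
--         if 'address' in result:
--             response += f"\n   address: {result['address']}"
--
--     return response
-- ===== SOURCE B (Python) =====
-- _SPECS = [
--     ('name', '', ''),
--     ('type', ' (', ')'),
--     ('area', ' in ', ''),
--     ('pricerange', ' - ', ' price range'),
--     ('phone', '\n   phone: ', ''),
--     ('address', '\n   address: ', ''),
-- ]
--
-- def _fields(result, specs):
--     # recursion over the spec table: fragment for the first spec, then the rest
--     if not specs:
--         return ''
--     key, pre, suf = specs[0]
--     head = (pre + result[key] + suf) if key in result else ''
--     return head + _fields(result, specs[1:])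
--
-- def _records(results, i):
--     # recursion over the result list, numbering from i
--     if not results:
--         return ''
--     return '\n' + str(i) + '. ' + _fields(results[0], _SPECS) + _records(results[1:], i + 1)
--
-- def format_database_response(category, results):
--     if not results:
--         return f"I couldn't find any {category} matching your criteria."
--     return f"I found {len(results)} matching {category}(s):\n" + _records(results, 1)
-- ===== Notes on version B (the rewrite author's own statement) =====
-- stated objective: alternative
-- what changed: B replaces A's imperative enumerate-loop with six unrolled if-branches extending one accumulator string by structural recursion: a recursive descent over the result list (numbering from i) and, inside it, a recursive walk over a field-spec table, each call prepending its fragment to the recursively built suffix.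
import Mathlib
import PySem

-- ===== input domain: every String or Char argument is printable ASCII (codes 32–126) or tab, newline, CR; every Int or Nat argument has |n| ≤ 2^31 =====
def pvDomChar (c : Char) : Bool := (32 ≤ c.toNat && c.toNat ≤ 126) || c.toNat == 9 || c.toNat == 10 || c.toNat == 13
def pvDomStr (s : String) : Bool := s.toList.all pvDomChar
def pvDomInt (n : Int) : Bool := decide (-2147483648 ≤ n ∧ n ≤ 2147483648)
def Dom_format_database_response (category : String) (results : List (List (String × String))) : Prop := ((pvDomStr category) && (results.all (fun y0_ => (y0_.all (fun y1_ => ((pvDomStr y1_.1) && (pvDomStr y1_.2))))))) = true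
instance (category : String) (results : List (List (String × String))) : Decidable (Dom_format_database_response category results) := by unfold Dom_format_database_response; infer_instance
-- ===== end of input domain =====

-- B rebuilds the response by structural recursion (over the result list and over a field-spec
-- table) instead of A's enumerate-loop with six unrolled branches extending one accumulator.

-- ===== PORT A =====
-- A's loop body for one record: six if-branches appending to the accumulator string.
def fdrStepA (response : String) (i : Int) (result : List (String × String)) : String :=
  let response := response ++ "\n" ++ PySem.Int.toStr i ++ ". "
  let response := match result.lookup "name" with
    | some v => response ++ v
    | none => response
  let response := match result.lookup "type" with
    | some v => response ++ " (" ++ v ++ ")"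
    | none => response
  let response := match result.lookup "area" with
    | some v => response ++ " in " ++ v
    | none => response
  let response := match result.lookup "pricerange" with
    | some v => response ++ " - " ++ v ++ " price range"
    | none => response
  let response := match result.lookup "phone" with
    | some v => response ++ "\n   phone: " ++ v
    | none => response
  let response := match result.lookup "address" with
    | some v => response ++ "\n   address: " ++ v
    | none => response
  response

def format_database_response (category : String) (results : List (List (String × String))) : String :=
  if results = [] then
    "I couldn't find any " ++ category ++ " matching your criteria."
  else
    (PySem.List.enumerate results 1).foldl (fun response p => fdrStepA response p.1 p.2)
      ("I found " ++ PySem.Int.toStr (results.length : Int) ++ " matching " ++ category ++ "(s):\n")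

-- ===== PORT B =====
-- B's field-spec table, each template "pre{}suf" as (key, pre, suf).
def fdrSpecs : List (String × String × String) :=
  [("name", "", ""), ("type", " (", ")"), ("area", " in ", ""),
   ("pricerange", " - ", " price range"), ("phone", "\n   phone: ", ""),
   ("address", "\n   address: ", "")]

-- recursion over the spec table: first spec's fragment, then the rest
def fdrFields (result : List (String × String)) : List (String × String × String) → String
  | [] => ""
  | s :: rest =>
    (match result.lookup s.1 with
     | some v => s.2.1 ++ v ++ s.2.2
     | none => "") ++ fdrFields result rest

-- recursion over the result list, numbering from i
def fdrRecords : List (List (String × String)) → Int → String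
  | [], _ => ""
  | r :: rs, i => "\n" ++ PySem.Int.toStr i ++ ". " ++ fdrFields r fdrSpecs ++ fdrRecords rs (i + 1)

def format_database_response_alt (category : String) (results : List (List (String × String))) : String :=
  if results = [] then
    "I couldn't find any " ++ category ++ " matching your criteria."
  else
    "I found " ++ PySem.Int.toStr (results.length : Int) ++ " matching " ++ category ++ "(s):\n"
      ++ fdrRecords results 1

-- ===== PRECONDITION & SPEC =====
def Spec_format_database_response (category : String) (results : List (List (String × String))) (out : String) : Prop := out = format_database_response_alt category results
instance (category : String) (results : List (List (String × String))) (out : String) : Decidable (Spec_format_database_response category results out) := by unfold Spec_format_database_response; infer_instance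

-- ===== CLAIM (what is proved, stated in full; the proofs are below) =====
def Claim_equal_format_database_response : Prop := ∀ (category : String) (results : List (List (String × String))), Dom_format_database_response category results → Spec_format_database_response category results (format_database_response category results)

-- ===== LEMMAS AND PROOFS =====

theorem fdr_step_eq (acc : String) (i : Int) (r : List (String × String)) :
    fdrStepA acc i r = acc ++ ("\n" ++ PySem.Int.toStr i ++ ". " ++ fdrFields r fdrSpecs) := by
  unfold fdrStepA fdrSpecs
  apply String.ext
  rcases h1 : r.lookup "name" with _ | v1 <;>
  rcases h2 : r.lookup "type" with _ | v2 <;>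
  rcases h3 : r.lookup "area" with _ | v3 <;>
  rcases h4 : r.lookup "pricerange" with _ | v4 <;>
  rcases h5 : r.lookup "phone" with _ | v5 <;>
  rcases h6 : r.lookup "address" with _ | v6 <;>
  simp [fdrFields, h1, h2, h3, h4, h5, h6]

theorem fdr_loop_eq (rs : List (List (String × String))) :
    ∀ (i : Int) (acc : String),
      (PySem.List.enumerate rs i).foldl (fun response p => fdrStepA response p.1 p.2) acc
        = acc ++ fdrRecords rs i := by
  induction rs with
  | nil => intro i acc; simp [PySem.List.enumerate_nil, fdrRecords]
  | cons r rs ih =>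
    intro i acc
    rw [PySem.List.enumerate_cons]
    simp only [List.foldl_cons]
    rw [ih, fdr_step_eq, fdrRecords]
    apply String.ext; simp

-- ===== VERDICT (by name: the statement is the Claim_ definition above) =====
theorem format_database_response_spec : Claim_equal_format_database_response := by
  intro category results _
  unfold Spec_format_database_response format_database_response format_database_response_alt
  by_cases h : results = []
  · rw [if_pos h, if_pos h]
  · rw [if_neg h, if_neg h, fdr_loop_eq]
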